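-- pv_equiv track=rewrite | github.com/bushi510/optimal-sample-selection | 移动端/app.py | build_coverage_map
-- ===== SOURCE A (Python) =====
-- def build_coverage_map(candidates, targets, s):
--     coverage_map = {}
--     target_sets = [(t, set(t)) for t in targets]
--     for candidate in candidates:
--         candidate_set = set(candidate)
--         covered_targets = set()
--         for target, target_set in target_sets:
--             if len(candidate_set & target_set) >= s:
--                 covered_targets.add(target)
--         coverage_map[candidate] = covered_targets
--     return coverage_map
-- ===== SOURCE B (Python) =====
-- def build_coverage_map(candidates, targets, s):
--     # Sorted-merge (two-pointer) overlap counting over deduplicated keys,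
--     # instead of per-pair hash-set intersections.
--     def merge_count(xs, ys):
--         i = j = k = 0
--         while i < len(xs) and j < len(ys):
--             if xs[i] < ys[j]:
--                 i += 1
--             elif ys[j] < xs[i]:
--                 j += 1
--             else:
--                 i += 1
--                 j += 1
--                 k += 1
--         return k
--
--     uniq_targets = list(dict.fromkeys(targets))
--     prepared = [(t, sorted(set(t))) for t in uniq_targets]
--     result = {}
--     for c in dict.fromkeys(candidates):
--         cs = sorted(set(c))
--         result[c] = {t for t, ts in prepared if merge_count(cs, ts) >= s}
--     return result
-- ===== Notes on version B (the rewrite author's own statement) =====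
-- stated objective: alternative
-- what changed: Replaces the per-candidate x per-target hash-set intersection scan by precomputing sorted deduplicated element lists once per distinct target and counting overlap with a two-pointer sorted merge, mapping over deduplicated candidates instead of a dict-insert loop.
import Mathlib
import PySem

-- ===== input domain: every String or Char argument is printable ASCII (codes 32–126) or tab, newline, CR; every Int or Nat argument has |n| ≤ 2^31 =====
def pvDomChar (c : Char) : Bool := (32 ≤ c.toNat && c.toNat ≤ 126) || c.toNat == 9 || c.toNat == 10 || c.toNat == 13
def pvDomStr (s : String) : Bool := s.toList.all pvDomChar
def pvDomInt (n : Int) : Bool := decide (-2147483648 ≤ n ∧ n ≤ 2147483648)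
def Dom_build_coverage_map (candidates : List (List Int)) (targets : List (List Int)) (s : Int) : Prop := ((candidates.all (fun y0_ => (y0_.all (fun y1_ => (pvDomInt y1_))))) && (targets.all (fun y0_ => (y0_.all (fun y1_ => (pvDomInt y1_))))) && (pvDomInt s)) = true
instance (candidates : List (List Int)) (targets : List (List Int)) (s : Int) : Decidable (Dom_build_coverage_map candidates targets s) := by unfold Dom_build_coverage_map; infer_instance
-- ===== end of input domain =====

-- B replaces the per-candidate × per-target hash-set intersections by a two-pointer merge
-- count over sorted deduplicated element lists, mapping over deduplicated candidates (alternative decomposition).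

-- ===== PORT A =====
def build_coverage_map (candidates : List (List Int)) (targets : List (List Int)) (s : Int) : List (List Int × List (List Int)) :=
  let target_sets := targets.map (fun t => (t, PySem.Set.ofList t))
  (candidates.foldl
    (fun (coverage_map : PySem.Dict (List Int) (List (List Int))) candidate =>
      let candidate_set := PySem.Set.ofList candidate
      let covered_targets := target_sets.foldl
        (fun covered p =>
          if s ≤ ((PySem.Set.inter candidate_set p.2).length : Int) then PySem.Set.add covered p.1
          else covered)
        PySem.Set.empty
      coverage_map.insert candidate covered_targets)
    PySem.Dict.empty).items

-- ===== PORT B =====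
-- merge_count: two-pointer shared-element count over two sorted duplicate-free lists
def bcmMergeCount : List Int → List Int → Int
  | [], _ => 0
  | _ :: _, [] => 0
  | x :: xs, y :: ys =>
    if x < y then bcmMergeCount xs (y :: ys)
    else if y < x then bcmMergeCount (x :: xs) ys
    else bcmMergeCount xs ys + 1

def build_coverage_map_alt (candidates : List (List Int)) (targets : List (List Int)) (s : Int) : List (List Int × List (List Int)) :=
  let uniq_targets := PySem.List.dedup targets
  let prepared := uniq_targets.map (fun t => (t, PySem.List.sorted (PySem.Set.ofList t) (fun x => x) false))
  (PySem.List.dedup candidates).map (fun c =>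
    let cs := PySem.List.sorted (PySem.Set.ofList c) (fun x => x) false
    (c, (prepared.filter (fun p => decide (s ≤ bcmMergeCount cs p.2))).map Prod.fst))

-- ===== PRECONDITION & SPEC =====
def Spec_build_coverage_map (candidates : List (List Int)) (targets : List (List Int)) (s : Int) (out : List (List Int × List (List Int))) : Prop := out = build_coverage_map_alt candidates targets s
instance (candidates : List (List Int)) (targets : List (List Int)) (s : Int) (out : List (List Int × List (List Int))) : Decidable (Spec_build_coverage_map candidates targets s out) := by unfold Spec_build_coverage_map; infer_instance

-- ===== CLAIM (what is proved, stated in full; the proofs are below) =====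
def Claim_equal_build_coverage_map : Prop := ∀ (candidates : List (List Int)) (targets : List (List Int)) (s : Int), Dom_build_coverage_map candidates targets s → Spec_build_coverage_map candidates targets s (build_coverage_map candidates targets s)

-- ===== LEMMAS AND PROOFS =====
-- merge count on strictly sorted lists counts shared elements
theorem bcmMergeCount_eq_countP (xs ys : List Int)
    (hx : xs.Pairwise (· < ·)) (hy : ys.Pairwise (· < ·)) :
    bcmMergeCount xs ys = ((xs.countP (fun x => decide (x ∈ ys)) : Nat) : Int) := by
  induction xs, ys using bcmMergeCount.induct with
  | case1 ys => simp [bcmMergeCount]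
  | case2 x xs => simp [bcmMergeCount]
  | case3 x xs y ys h ih =>
    rcases List.pairwise_cons.mp hx with ⟨_, hx'⟩
    rcases List.pairwise_cons.mp hy with ⟨hyall, _⟩
    have hnm : x ∉ y :: ys := by
      intro hm
      rcases List.mem_cons.mp hm with rfl | hm'
      · omega
      · exact absurd (hyall _ hm') (by omega)
    rw [show bcmMergeCount (x :: xs) (y :: ys) = bcmMergeCount xs (y :: ys) by
          simp [bcmMergeCount, h],
        List.countP_cons_of_neg (by simpa using hnm)]
    exact ih hx' hy
  | case4 x xs y ys h1 h2 ih =>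
    rcases List.pairwise_cons.mp hy with ⟨_, hy'⟩
    have hcongr : (x :: xs).countP (fun z => decide (z ∈ y :: ys))
        = (x :: xs).countP (fun z => decide (z ∈ ys)) := by
      refine List.countP_congr ?_
      intro z hz
      have hyz : y < z := by
        rcases List.mem_cons.mp hz with rfl | hz'
        · omega
        · exact lt_trans h2 ((List.pairwise_cons.mp hx).1 _ hz')
      simp only [decide_eq_true_eq, List.mem_cons]
      constructor
      · rintro (rfl | hm)
        · omega
        · exact hm
      · exact Or.inr
    rw [show bcmMergeCount (x :: xs) (y :: ys) = bcmMergeCount (x :: xs) ys by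
          simp [bcmMergeCount, h1, h2],
        hcongr]
    exact ih hx hy'
  | case5 x xs y ys h1 h2 ih =>
    have hxy : x = y := by omega
    rcases List.pairwise_cons.mp hx with ⟨hxall, hx'⟩
    rcases List.pairwise_cons.mp hy with ⟨_, hy'⟩
    have hcongr : xs.countP (fun z => decide (z ∈ y :: ys))
        = xs.countP (fun z => decide (z ∈ ys)) := by
      refine List.countP_congr ?_
      intro z hz
      have hyz : y < z := hxy ▸ hxall _ hz
      simp only [decide_eq_true_eq, List.mem_cons]
      constructor
      · rintro (rfl | hm)
        · omega
        · exact hm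
      · exact Or.inr
    rw [show bcmMergeCount (x :: xs) (y :: ys) = bcmMergeCount xs ys + 1 by
          simp [bcmMergeCount, h1, h2],
        List.countP_cons_of_pos (by simp [hxy]),
        ih hx' hy']
    rw [hcongr]
    push_cast
    ring

-- sorted distinct list is strictly sorted
theorem sortedSet_pairwise_lt (a : List Int) :
    (PySem.List.sorted (PySem.Set.ofList a) (fun x => x) false).Pairwise (· < ·) := by
  have hle := PySem.List.sorted_pairwise (PySem.Set.ofList a) (fun x => x)
  have hnd : (PySem.List.sorted (PySem.Set.ofList a) (fun x => x) false).Nodup :=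
    ((PySem.List.sorted_perm (PySem.Set.ofList a) (fun x => x) false).nodup_iff).mpr
      (PySem.Set.nodup_ofList a)
  exact (hle.and hnd).imp (fun h => lt_of_le_of_ne h.1 h.2)

-- merge count over sorted distinct lists = size of set intersection
theorem mergeCount_eq_inter_length (a b : List Int) :
    bcmMergeCount (PySem.List.sorted (PySem.Set.ofList a) (fun x => x) false)
        (PySem.List.sorted (PySem.Set.ofList b) (fun x => x) false)
      = (((PySem.Set.inter (PySem.Set.ofList a) (PySem.Set.ofList b)).length : Nat) : Int) := by
  rw [bcmMergeCount_eq_countP _ _ (sortedSet_pairwise_lt a) (sortedSet_pairwise_lt b)]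
  congr 1
  have hpa := PySem.List.sorted_perm (PySem.Set.ofList a) (fun x => x) false
  have hpb := PySem.List.sorted_perm (PySem.Set.ofList b) (fun x => x) false
  rw [hpa.countP_eq]
  have hinter : (PySem.Set.inter (PySem.Set.ofList a) (PySem.Set.ofList b)).length
      = (PySem.Set.ofList a).countP (fun x => List.contains (PySem.Set.ofList b) x) := by
    rw [List.countP_eq_length_filter]
    rfl
  rw [hinter]
  refine List.countP_congr ?_
  intro x _
  simp [List.contains_eq_mem, hpb.mem_iff]

-- a dict-insert loop whose value depends only on the key is a map over ordered-dedup keys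
theorem dict_foldl_insert_eq_map (f : List Int → List (List Int)) :
    ∀ (l acc : List (List Int)),
      (l.foldl (fun d c => d.insert c (f c))
        (PySem.Dict.mk (acc.map (fun c => (c, f c))))).items
      = (PySem.Set.update acc l).map (fun c => (c, f c)) := by
  intro l
  induction l with
  | nil => intro acc; simp [PySem.Set.update]
  | cons c l ih =>
    intro acc
    have hstep : (PySem.Dict.mk (acc.map (fun c => (c, f c)))).insert c (f c)
        = PySem.Dict.mk ((PySem.Set.add acc c).map (fun c => (c, f c))) := by
      by_cases hc : c ∈ acc
      · have hcon : (PySem.Dict.mk (acc.map (fun c => (c, f c)))).contains c = true := by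
          simp only [PySem.Dict.contains, List.any_map, Function.comp, List.any_eq_true]
          exact ⟨c, hc, by simp⟩
        have hadd : PySem.Set.add acc c = acc := by
          simp [PySem.Set.add, PySem.Set.contains_eq_listContains, List.contains_eq_mem, hc]
        rw [PySem.Dict.insert, if_pos hcon, hadd]
        congr 1
        rw [List.map_map]
        refine List.map_congr_left ?_
        intro a _
        by_cases hac : a = c
        · simp [Function.comp, hac]
        · simp [Function.comp, hac]
      · have hcon : (PySem.Dict.mk (acc.map (fun c => (c, f c)))).contains c = false := by
          simp only [PySem.Dict.contains, List.any_map, Function.comp, List.any_eq_false]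
          intro a ha
          simp only [beq_iff_eq]
          intro h; exact hc (h ▸ ha)
        have hadd : PySem.Set.add acc c = acc ++ [c] := by
          simp [PySem.Set.add, PySem.Set.contains_eq_listContains, List.contains_eq_mem, hc]
        rw [PySem.Dict.insert, hcon, hadd]
        simp
    rw [List.foldl_cons, hstep, ih (PySem.Set.add acc c)]
    rfl

-- filter commutes through the Set.add fold
theorem update_filter (p : List Int → Bool) :
    ∀ (l s : List (List Int)),
      PySem.Set.update (s.filter p) (l.filter p) = (PySem.Set.update s l).filter p := by
  intro l
  induction l with
  | nil => intro s; simp [PySem.Set.update]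
  | cons x l ih =>
    intro s
    have hadd_pos : p x = true → PySem.Set.add (s.filter p) x = (PySem.Set.add s x).filter p := by
      intro hpx
      by_cases hx : x ∈ s
      · have h1 : x ∈ s.filter p := List.mem_filter.mpr ⟨hx, hpx⟩
        simp [PySem.Set.add, PySem.Set.contains_eq_listContains, List.contains_eq_mem, hx, h1]
      · have h1 : x ∉ s.filter p := fun h => hx (List.mem_filter.mp h).1
        simp [PySem.Set.add, PySem.Set.contains_eq_listContains, List.contains_eq_mem, hx, h1,
          List.filter_append, hpx]
    have hadd_neg : p x = false → (PySem.Set.add s x).filter p = s.filter p := by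
      intro hpx
      by_cases hx : x ∈ s
      · simp [PySem.Set.add, PySem.Set.contains_eq_listContains, List.contains_eq_mem, hx]
      · simp [PySem.Set.add, PySem.Set.contains_eq_listContains, List.contains_eq_mem, hx,
          List.filter_append, hpx]
    cases hpx : p x with
    | true =>
      rw [show (x :: l).filter p = x :: l.filter p by simp [hpx]]
      show PySem.Set.update (PySem.Set.add (s.filter p) x) (l.filter p)
          = (PySem.Set.update (PySem.Set.add s x) l).filter p
      rw [hadd_pos hpx]
      exact ih (PySem.Set.add s x)
    | false =>
      rw [show (x :: l).filter p = l.filter p by simp [hpx]]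
      show PySem.Set.update (s.filter p) (l.filter p)
          = (PySem.Set.update (PySem.Set.add s x) l).filter p
      rw [show s.filter p = (PySem.Set.add s x).filter p from (hadd_neg hpx).symm]
      exact ih (PySem.Set.add s x)

theorem ofList_filter (p : List Int → Bool) (l : List (List Int)) :
    PySem.Set.ofList (l.filter p) = (PySem.Set.ofList l).filter p := by
  have h := update_filter p l []
  simpa using h

-- A's inner loop / B's inner expression as named helpers (proof-only)
def bcmCovA (targets : List (List Int)) (s : Int) (c : List Int) : List (List Int) :=
  (targets.map (fun t => (t, PySem.Set.ofList t))).foldl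
    (fun covered p =>
      if s ≤ ((PySem.Set.inter (PySem.Set.ofList c) p.2).length : Int) then PySem.Set.add covered p.1
      else covered)
    PySem.Set.empty

def bcmCovB (targets : List (List Int)) (s : Int) (c : List Int) : List (List Int) :=
  (((PySem.List.dedup targets).map
      (fun t => (t, PySem.List.sorted (PySem.Set.ofList t) (fun x => x) false))).filter
    (fun p => decide (s ≤ bcmMergeCount (PySem.List.sorted (PySem.Set.ofList c) (fun x => x) false) p.2))).map
    Prod.fst

theorem covA_eq_covB (targets : List (List Int)) (s : Int) (c : List Int) :
    bcmCovA targets s c = bcmCovB targets s c := by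
  have hA : bcmCovA targets s c
      = (PySem.Set.ofList targets).filter
          (fun t => decide (s ≤ ((PySem.Set.inter (PySem.Set.ofList c) (PySem.Set.ofList t)).length : Int))) := by
    unfold bcmCovA
    rw [List.foldl_map]
    rw [show (List.foldl
        (fun x y =>
          if s ≤ ((PySem.Set.inter (PySem.Set.ofList c) ((fun t => (t, PySem.Set.ofList t)) y).2).length : Int)
          then PySem.Set.add x ((fun t => (t, PySem.Set.ofList t)) y).1 else x)
        PySem.Set.empty targets)
      = List.foldl PySem.Set.add PySem.Set.empty
          (targets.filter (fun t => decide (s ≤ ((PySem.Set.inter (PySem.Set.ofList c) (PySem.Set.ofList t)).length : Int))))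
      from PySem.List.foldl_ite_eq_foldl_filter
        (p := fun t => s ≤ ((PySem.Set.inter (PySem.Set.ofList c) (PySem.Set.ofList t)).length : Int))
        (f := PySem.Set.add) targets PySem.Set.empty]
    exact (ofList_filter _ targets)
  have hB : bcmCovB targets s c
      = (PySem.Set.ofList targets).filter
          (fun t => decide (s ≤ bcmMergeCount (PySem.List.sorted (PySem.Set.ofList c) (fun x => x) false)
            (PySem.List.sorted (PySem.Set.ofList t) (fun x => x) false))) := by
    unfold bcmCovB
    rw [List.filter_map, List.map_map]
    rw [show (Prod.fst ∘ fun t => (t, PySem.List.sorted (PySem.Set.ofList t) (fun x => x) false))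
        = (id : List Int → List Int) from rfl, List.map_id]
    exact List.filter_congr (fun t _ => rfl)
  rw [hA, hB]
  refine List.filter_congr ?_
  intro t _
  exact decide_eq_decide.mpr (by rw [mergeCount_eq_inter_length c t])


-- ===== VERDICT (by name: the statement is the Claim_ definition above) =====
theorem build_coverage_map_spec : Claim_equal_build_coverage_map := by
  intro candidates targets s _
  show build_coverage_map candidates targets s = build_coverage_map_alt candidates targets s
  have hA : build_coverage_map candidates targets s
      = (PySem.Set.ofList candidates).map (fun c => (c, bcmCovA targets s c)) :=
    dict_foldl_insert_eq_map (bcmCovA targets s) candidates []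
  rw [hA]
  show _ = (PySem.Set.ofList candidates).map (fun c => (c, bcmCovB targets s c))
  exact List.map_congr_left (fun c _ => congrArg (fun v => (c, v)) (covA_eq_covB targets s c))
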